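-- pv_equiv track=rewrite | github.com/perfectlyodd/spoj-python | palindrome-loopy.py | bookend_numerical_string
-- ===== SOURCE A (Python) =====
-- def add_one_to_string(string_number, length):
--     if length == 0:
--         return '1'
--     position = 1
--     carry = True
--     while carry:
--         char = string_number[length - position]
--         if position > length:
--             string_number = '1' + string_number
--             carry = False
--         elif '0' <= char and char <= '8':
--             carry = False
--             string_number = string_number[:length - position:] + chr(ord(char) + 1) + string_number[length - position + 1::]
--         else:
--             string_number = string_number[:length - position:] + '0' + string_number[length - position + 1::]
--             position += 1
--     return string_number
--
-- def is_bookended(string_number, length):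
--     return string_number[0] == string_number[length - 1]
--
-- def bookend_numerical_string(string_number, length):
--     if length == 0:
--         return string_number
--     done = is_bookended(string_number, length)
--     while not done:
--         string_number = add_one_to_string(string_number, length)
--         done = is_bookended(string_number, length)
--     return string_number
-- ===== SOURCE B (Python) =====
-- def bookend_numerical_string(string_number, length):
--     # Closed form on the first `length` characters (the task never touches the rest):
--     # the answer only ever raises the last digit to the first digit, possibly after one
--     # carry into the next multiple of ten -- no search loop.
--     if length == 0:
--         return string_number
--     first = string_number[0]
--     last = string_number[length - 1]
--     head = string_number[:length]
--     tail = string_number[length:]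
--     if last <= first:
--         # raise the last digit to the first digit; no carry occurs
--         return head[:-1] + first + tail
--     # carry: add one to the prefix (it is not all nines: its first char is first < last),
--     # the last digit becomes 0 and is then raised to the new first digit
--     prefix = head[:-1]
--     body = prefix.rstrip('9')
--     bumped = body[:-1] + chr(ord(body[-1]) + 1) + '0' * (len(prefix) - len(body))
--     return bumped + bumped[0] + tail
-- ===== Notes on version B (the rewrite author's own statement) =====
-- stated objective: alternative
-- what changed: A repeatedly string-increments the number (an inner carry loop with slicing, run until first digit equals last digit); B computes the answer in one closed-form step on the length-prefix: if its last char is at most its first it just sets the last char to the first, otherwise it performs one carry into the next multiple of ten (rstrip trailing nines, bump one digit, pad zeros) and appends the new first digit, keeping the tail unchanged.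
-- outside the precondition, e.g. on bookend_numerical_string('ab', 2): A returns '110', B returns 'bb'; on bookend_numerical_string('+5', 2): A returns '110', B returns ',,'
import Mathlib
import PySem

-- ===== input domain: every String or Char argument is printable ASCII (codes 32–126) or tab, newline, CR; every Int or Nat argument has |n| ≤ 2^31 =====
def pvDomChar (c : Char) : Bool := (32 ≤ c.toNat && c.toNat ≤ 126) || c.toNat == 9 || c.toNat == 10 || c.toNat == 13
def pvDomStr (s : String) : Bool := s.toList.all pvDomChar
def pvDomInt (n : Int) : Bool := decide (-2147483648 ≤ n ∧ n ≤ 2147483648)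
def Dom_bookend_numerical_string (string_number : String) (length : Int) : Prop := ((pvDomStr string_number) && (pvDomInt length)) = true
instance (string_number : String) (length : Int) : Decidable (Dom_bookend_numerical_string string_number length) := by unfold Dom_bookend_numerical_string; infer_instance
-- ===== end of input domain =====

-- B replaces A's increment-until-bookended search by a closed form on the digit string
-- (at most one carry into the next multiple of ten, then set the last digit); return value only.

-- ===== PORT A =====

-- inner `while carry` loop of add_one_to_string; fuel ≥ iteration count (≤ length+1) makes it total
def pvAddLoop (s : List Char) (length : Int) (position : Int) : Nat → List Char
  | 0 => s
  | fuel+1 =>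
    match PySem.List.pyGet? s (length - position) with
    | none => s   -- Python raises IndexError here; unreachable on Pre_
    | some char =>
      if length < position then '1' :: s
      else if '0' ≤ char ∧ char ≤ '8' then
        PySem.List.slice s none (some (length - position)) ++ [Char.ofNat (char.toNat + 1)]
          ++ PySem.List.slice s (some (length - position + 1)) none
      else
        pvAddLoop (PySem.List.slice s none (some (length - position)) ++ ['0']
          ++ PySem.List.slice s (some (length - position + 1)) none) length (position + 1) fuel

def pvAddOne (s : List Char) (length : Int) : List Char :=
  if length == 0 then ['1'] else pvAddLoop s length 1 (length.toNat + 2)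

def pvIsBook (s : List Char) (length : Int) : Bool :=
  PySem.List.pyGet? s 0 == PySem.List.pyGet? s (length - 1)
  -- Python raises IndexError where either side is none; unreachable on Pre_

-- outer `while not done` loop; on Pre_ it runs at most 19 times, so fuel 100 is never exhausted
def pvBookLoop (s : List Char) (length : Int) : Nat → List Char
  | 0 => s
  | fuel+1 => if pvIsBook s length then s else pvBookLoop (pvAddOne s length) length fuel

def bookend_numerical_string (string_number : String) (length : Int) : String :=
  if length == 0 then string_number
  else String.ofList (pvBookLoop string_number.toList length 100)

-- ===== PORT B =====

-- hand port of str.rstrip('9') (PySem has no single-sided strip-with-chars): exact — drops precisely the trailing '9' characters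
def pvRstrip9 (cs : List Char) : List Char := (cs.reverse.dropWhile (fun c => c == '9')).reverse

def bookend_numerical_string_alt (string_number : String) (length : Int) : String :=
  if length == 0 then string_number
  else
    let head := PySem.List.slice string_number.toList none (some length)
    let tail := PySem.List.slice string_number.toList (some length) none
    match PySem.List.pyGet? string_number.toList 0, PySem.List.pyGet? string_number.toList (length - 1) with
    | some first, some last =>
      if last ≤ first then
        String.ofList (PySem.List.slice head none (some (-1)) ++ [first] ++ tail)
      else
        let pre := PySem.List.slice head none (some (-1))
        let body := pvRstrip9 pre
        match PySem.List.pyGet? body (-1) with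
        | some bl =>
          let bumped := PySem.List.slice body none (some (-1)) ++ [Char.ofNat (bl.toNat + 1)]
            ++ List.replicate (pre.length - body.length) '0'
          match PySem.List.pyGet? bumped 0 with
          | some b0 => String.ofList (bumped ++ [b0] ++ tail)
          | none => string_number   -- unreachable: bumped is never empty
        | none => string_number   -- Python raises IndexError (body empty); unreachable on Pre_
    | _, _ => string_number   -- Python raises IndexError (empty head, length ≠ 0); unreachable on Pre_

-- ===== PRECONDITION & SPEC =====

-- Pre_ restricts to the inputs on which A's value is the bookending of the first `length`
-- characters: 0 ≤ length ≤ len, and the `length`-prefix is either already bookended, or ends in a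
-- digit not above its first char (itself ≤ '9'), or is all digits. Outside it A raises/diverges
-- (length > len, negative length) or returns artefacts of its carry loop rewriting arbitrary
-- characters to '0' and prepending '1's; B does the natural closed-form thing there, so those
-- inputs are excluded.
def Pre_bookend_numerical_string (string_number : String) (length : Int) : Prop :=
  length = 0 ∨
  (1 ≤ length ∧ length ≤ (string_number.toList.length : Int) ∧
    ((string_number.toList.take length.toNat).head? = (string_number.toList.take length.toNat).getLast? ∨
     (48 ≤ (((string_number.toList.take length.toNat).getLast?).getD ' ').toNat ∧
      (((string_number.toList.take length.toNat).getLast?).getD ' ').toNat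
        ≤ (((string_number.toList.take length.toNat).head?).getD ' ').toNat ∧
      (((string_number.toList.take length.toNat).head?).getD ' ').toNat ≤ 57) ∨
     ((string_number.toList.take length.toNat).all (fun c => decide (48 ≤ c.toNat ∧ c.toNat ≤ 57)) = true)))
instance (string_number : String) (length : Int) : Decidable (Pre_bookend_numerical_string string_number length) := by
  unfold Pre_bookend_numerical_string; infer_instance

def pvWitness_bookend_numerical_string : String × Int := ("19", 2)

def Spec_bookend_numerical_string (string_number : String) (length : Int) (out : String) : Prop :=
  out = bookend_numerical_string_alt string_number length
instance (string_number : String) (length : Int) (out : String) : Decidable (Spec_bookend_numerical_string string_number length out) := by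
  unfold Spec_bookend_numerical_string; infer_instance

-- ===== CLAIM (what is proved, stated in full; the proofs are below) =====
def Claim_equal_bookend_numerical_string : Prop := ∀ (string_number : String) (length : Int), Dom_bookend_numerical_string string_number length → Pre_bookend_numerical_string string_number length → Spec_bookend_numerical_string string_number length (bookend_numerical_string string_number length)

-- ===== LEMMAS AND PROOFS =====

-- all-digit character lists
def pvDig (cs : List Char) : Prop := ∀ c ∈ cs, 48 ≤ c.toNat ∧ c.toNat ≤ 57

-- canonical zero-padded decimal representation, built from the right
def pvRep : Nat → Nat → List Char
  | 0, _ => []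
  | L+1, n => pvRep L (n/10) ++ [Char.ofNat (48 + n % 10)]

-- numeric value of a digit list
def pvNval (cs : List Char) : Nat := cs.foldl (fun a c => 10*a + (c.toNat - 48)) 0

-- closed-form target value: the common value both programs compute
def pvTgt (L n : Nat) : Nat :=
  if n / 10^(L-1) < n % 10 then (n/10+1)*10 + ((n/10+1)*10)/10^(L-1)
  else n + (n / 10^(L-1) - n % 10)

theorem pvCharVal (m : Nat) (h : m < 10) : (Char.ofNat (48 + m)).toNat = 48 + m := by
  interval_cases m <;> decide

theorem pvCharLe (a b : Char) : a ≤ b ↔ a.toNat ≤ b.toNat := ge_iff_le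

theorem pvCharEq (a b : Nat) (ha : a < 10) (hb : b < 10) :
    Char.ofNat (48 + a) = Char.ofNat (48 + b) ↔ a = b := by
  constructor
  · intro h
    have := congrArg Char.toNat h
    rw [pvCharVal a ha, pvCharVal b hb] at this
    omega
  · intro h; rw [h]

theorem pvCharToNatInj (a b : Char) (h : a.toNat = b.toNat) : a = b := by
  apply Char.ext
  exact UInt32.toNat_inj.mp h

theorem pvDivEq (n k q : Nat) (h1 : q * k ≤ n) (h2 : n < (q+1)*k) : n / k = q :=
  Nat.div_eq_of_lt_le h1 h2

theorem pvRep_length (L n : Nat) : (pvRep L n).length = L := by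
  induction L generalizing n with
  | zero => simp [pvRep]
  | succ L ih => simp [pvRep, ih]

theorem pvRep_dig (L n : Nat) : pvDig (pvRep L n) := by
  induction L generalizing n with
  | zero => intro c hc; simp [pvRep] at hc
  | succ L ih =>
      intro c hc
      simp only [pvRep, List.mem_append, List.mem_singleton] at hc
      rcases hc with hc | hc
      · exact ih _ _ hc
      · subst hc
        have h10 : n % 10 < 10 := Nat.mod_lt _ (by omega)
        have := pvCharVal (n % 10) h10
        omega

theorem pvNval_concat (ds : List Char) (c : Char) :
    pvNval (ds ++ [c]) = 10 * pvNval ds + (c.toNat - 48) := by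
  simp [pvNval, List.foldl_append]

theorem pvNval_rep (L n : Nat) (h : n < 10^L) : pvNval (pvRep L n) = n := by
  induction L generalizing n with
  | zero => simp [pvRep, pvNval]; omega
  | succ L ih =>
      have h10 : n % 10 < 10 := Nat.mod_lt _ (by omega)
      have hdiv : n / 10 < 10 ^ L := by
        have : n < 10 ^ L * 10 := by rw [← pow_succ]; exact h
        omega
      rw [pvRep, pvNval_concat, ih _ hdiv, pvCharVal _ h10]
      omega

theorem pvRep_nval (cs : List Char) (h : pvDig cs) : pvRep cs.length (pvNval cs) = cs := by
  induction cs using List.reverseRecOn with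
  | nil => simp [pvRep]
  | append_singleton ds c ih =>
      have hds : pvDig ds := fun x hx => h x (List.mem_append_left _ hx)
      have hc := h c (List.mem_append_right _ (List.mem_singleton_self c))
      rw [pvNval_concat]
      have hd : c.toNat - 48 < 10 := by omega
      simp only [List.length_append, List.length_singleton, pvRep]
      have hq : (10 * pvNval ds + (c.toNat - 48)) / 10 = pvNval ds := by omega
      have hr : (10 * pvNval ds + (c.toNat - 48)) % 10 = c.toNat - 48 := by omega
      rw [hq, hr, ih hds]
      have : 48 + (c.toNat - 48) = c.toNat := by omega
      rw [this, Char.ofNat_toNat]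

theorem pvNval_lt (cs : List Char) (h : pvDig cs) : pvNval cs < 10^cs.length := by
  induction cs using List.reverseRecOn with
  | nil => simp [pvNval]
  | append_singleton ds c ih =>
      have hds : pvDig ds := fun x hx => h x (List.mem_append_left _ hx)
      have hc := h c (List.mem_append_right _ (List.mem_singleton_self c))
      have := ih hds
      rw [pvNval_concat]
      simp only [List.length_append, List.length_singleton, pow_succ]
      omega

theorem pvRep_head (L n : Nat) (hL : 0 < L) (h : n < 10^L) :
    (pvRep L n)[0]? = some (Char.ofNat (48 + n / 10^(L-1))) := by
  induction L generalizing n with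
  | zero => omega
  | succ L ih =>
      rcases Nat.eq_zero_or_pos L with rfl | hL'
      · have h' : n < 10 := by simpa using h
        show (pvRep (0+1) n)[0]? = _
        rw [pvRep, pvRep]
        simp [Nat.mod_eq_of_lt h']
      · have hdiv : n / 10 < 10 ^ L := by
          have : n < 10 ^ L * 10 := by rw [← pow_succ]; exact h
          omega
        rw [pvRep, List.getElem?_append_left (by rw [pvRep_length]; omega), ih _ hL' hdiv]
        have hpow : (10:Nat) * 10^(L-1) = 10^(L+1-1) := by
          rw [← pow_succ']; congr 1; omega
        rw [Nat.div_div_eq_div_mul, hpow]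

theorem pvRep_concat (a k m d : Nat) (hd : d < 10) :
    pvRep (a + 1 + k) ((10*m + d) * 10^k) = pvRep a m ++ [Char.ofNat (48 + d)] ++ List.replicate k '0' := by
  induction k with
  | zero =>
      simp only [pow_zero, mul_one, List.replicate_zero, List.append_nil, pvRep]
      have h1 : (10*m + d) / 10 = m := by omega
      have h2 : (10*m + d) % 10 = d := by omega
      rw [h1, h2]
  | succ k ih =>
      have hx : (10*m + d) * 10^(k+1) = ((10*m + d) * 10^k) * 10 := by ring
      have h1 : ((10*m + d) * 10^k) * 10 / 10 = (10*m + d) * 10^k := by omega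
      have h2 : ((10*m + d) * 10^k) * 10 % 10 = 0 := by omega
      show pvRep (a + 1 + k + 1) _ = _
      rw [pvRep, hx, h1, h2, ih]
      have : (Char.ofNat (48 + 0)) = '0' := by decide
      rw [this, List.replicate_succ']
      simp [List.append_assoc]

theorem pvAddLoop_spec (fuel : Nat) : ∀ (front : List Char) (k : Nat) (rest : List Char), pvDig front →
    pvNval front + 1 < 10 ^ front.length → front.length ≤ fuel →
    pvAddLoop (front ++ (List.replicate k '0' ++ rest)) ((front.length + k : Nat) : Int) ((k : Int) + 1) fuel
      = pvRep (front.length + k) ((pvNval front + 1) * 10^k) ++ rest := by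
  induction fuel with
  | zero =>
      intro front k rest hdig hlt hf
      have h0 : front.length = 0 := by omega
      rw [List.length_eq_zero_iff] at h0
      subst h0
      simp [pvNval] at hlt
  | succ fuel ih =>
      intro front k rest hdig hlt hf
      rcases List.eq_nil_or_concat front with rfl | ⟨ds, c, rfl⟩
      · simp [pvNval] at hlt
      · simp only [List.concat_eq_append] at hdig hlt hf ⊢
        have hlen : (ds ++ [c]).length = ds.length + 1 := by simp
        have hdigds : pvDig ds := fun x hx => hdig x (List.mem_append_left _ hx)
        have hc := hdig c (List.mem_append_right _ (List.mem_singleton_self c))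
        simp only [pvAddLoop]
        have hidx : (((ds ++ [c]).length + k : Nat) : Int) - ((k:Int)+1) = (ds.length : Int) := by
          rw [hlen]; push_cast; ring
        rw [hidx]
        rw [show (ds ++ [c]) ++ (List.replicate k '0' ++ rest)
            = ds ++ (c :: (List.replicate k '0' ++ rest)) by simp]
        simp only [PySem.List.pyGet?_append_length]
        rw [if_neg (show ¬ ((((ds ++ [c]).length + k : Nat) : Int) < (k:Int)+1) by
          rw [hlen]; push_cast; omega)]
        rw [PySem.List.slice_to_natCast, List.take_left]
        rw [show (ds.length : Int) + 1 = ((ds.length + 1 : Nat) : Int) by push_cast; ring]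
        rw [PySem.List.slice_from_natCast]
        rw [show ds ++ (c :: (List.replicate k '0' ++ rest))
            = (ds ++ [c]) ++ (List.replicate k '0' ++ rest) by simp,
          List.drop_left' hlen]
        have h0' : ('0' : Char).toNat = 48 := rfl
        have h8' : ('8' : Char).toNat = 56 := rfl
        have hcond : ('0' ≤ c ∧ c ≤ '8') ↔ c.toNat ≤ 56 := by
          rw [pvCharLe, pvCharLe, h0', h8']
          omega
        by_cases h56 : c.toNat ≤ 56
        · rw [if_pos (hcond.mpr h56)]
          have hv : pvNval (ds ++ [c]) + 1 = 10 * pvNval ds + (c.toNat - 48 + 1) := by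
            rw [pvNval_concat]; omega
          rw [hlen, hv, pvRep_concat ds.length k (pvNval ds) (c.toNat - 48 + 1) (by omega),
            pvRep_nval ds hdigds, show 48 + (c.toNat - 48 + 1) = c.toNat + 1 by omega]
          simp [List.append_assoc]
        · rw [if_neg (fun hx => h56 (hcond.mp hx))]
          have hc57 : c.toNat = 57 := by omega
          rw [show ds ++ ['0'] ++ (List.replicate k '0' ++ rest)
              = ds ++ (List.replicate (k+1) '0' ++ rest) by
            simp [List.replicate_succ]]
          rw [show (((ds ++ [c]).length + k : Nat) : Int) = ((ds.length + (k+1) : Nat) : Int) by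
            rw [hlen]; push_cast; ring]
          rw [show ((k:Int) + 1) + 1 = ((k+1 : Nat) : Int) + 1 by push_cast; ring]
          have hlt' : pvNval ds + 1 < 10 ^ ds.length := by
            rw [pvNval_concat] at hlt
            rw [hlen, pow_succ] at hlt
            omega
          rw [ih ds (k+1) rest hdigds hlt' (by omega)]
          have hvv : (pvNval ds + 1) * 10^(k+1) = (pvNval (ds ++ [c]) + 1) * 10^k := by
            rw [pvNval_concat, hc57, pow_succ]; ring_nf
          rw [hvv, show ds.length + (k+1) = (ds ++ [c]).length + k by rw [hlen]; omega]

theorem pvAddOne_spec (cs rest : List Char) (h : pvDig cs) (hne : 0 < cs.length)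
    (hlt : pvNval cs + 1 < 10 ^ cs.length) :
    pvAddOne (cs ++ rest) (cs.length : Int) = pvRep cs.length (pvNval cs + 1) ++ rest := by
  unfold pvAddOne
  rw [if_neg (show ¬ (((cs.length : Int) == 0) = true) by
    simp only [beq_iff_eq, Int.natCast_eq_zero]
    omega)]
  have hfl : ((cs.length : Int)).toNat + 2 = cs.length + 2 := by simp
  rw [hfl]
  have := pvAddLoop_spec (cs.length + 2) cs 0 rest h hlt (by omega)
  simpa using this

theorem pvIsBook_rep (L n : Nat) (rest : List Char) (hL : 0 < L) (h : n < 10^L) :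
    pvIsBook (pvRep L n ++ rest) (L : Int) = decide (n / 10^(L-1) = n % 10) := by
  obtain ⟨M, rfl⟩ : ∃ M, L = M + 1 := ⟨L - 1, by omega⟩
  unfold pvIsBook
  have hf10 : n / 10^M < 10 := by
    apply (Nat.div_lt_iff_lt_mul (by positivity)).mpr
    calc n < 10^(M+1) := h
      _ = 10 * 10^M := by rw [pow_succ]; ring
  have hr10 : n % 10 < 10 := Nat.mod_lt _ (by omega)
  have hlenr : (pvRep (M+1) n).length = M + 1 := pvRep_length _ _
  have h1 : PySem.List.pyGet? (pvRep (M+1) n ++ rest) 0 = some (Char.ofNat (48 + n / 10^M)) := by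
    rw [PySem.List.pyGet?_zero, List.getElem?_append_left (by omega),
      pvRep_head (M+1) n (by omega) h]
    norm_num
  have h2 : PySem.List.pyGet? (pvRep (M+1) n ++ rest) ((M+1 : Nat) - 1 : Int)
      = some (Char.ofNat (48 + n % 10)) := by
    rw [show ((M+1 : Nat) : Int) - 1 = ((M : Nat) : Int) by push_cast; ring,
      PySem.List.pyGet?_natCast, List.getElem?_append_left (by omega), pvRep]
    have hgl : (pvRep M (n/10) ++ [Char.ofNat (48 + n % 10)])[(pvRep M (n/10)).length]?
        = some (Char.ofNat (48 + n % 10)) := List.getElem?_concat_length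
    rw [pvRep_length] at hgl
    exact hgl
  rw [h1, h2]
  by_cases hfr : n / 10^M = n % 10
  · simp only [show (M+1)-1 = M from rfl, hfr, decide_true]
    exact beq_self_eq_true _
  · simp only [show (M+1)-1 = M from rfl, hfr, decide_false]
    simp only [beq_eq_false_iff_ne, ne_eq, Option.some.injEq]
    intro hcon
    exact hfr ((pvCharEq _ _ hf10 hr10).mp hcon)

theorem pvTgt_of_boo (L n : Nat) (h : n / 10^(L-1) = n % 10) : pvTgt L n = n := by
  unfold pvTgt
  rw [if_neg (by omega)]
  omega

theorem pvPowSplit (L : Nat) (h2 : 2 ≤ L) :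
    ∃ q, 0 < q ∧ 10^(L-1) = 10*q ∧ 10^L = 10*(10*q) := by
  refine ⟨10^(L-2), pow_pos (by omega) _, ?_, ?_⟩
  · rw [← pow_succ']; congr 1; omega
  · rw [← pow_succ', ← pow_succ']; congr 1; omega

theorem pvTgt_spec (L n : Nat) (hL : 0 < L) (h : n < 10^L) :
    n ≤ pvTgt L n ∧ pvTgt L n < 10^L ∧ pvTgt L n ≤ n + 19 ∧
    (pvTgt L n) / 10^(L-1) = (pvTgt L n) % 10 := by
  rcases Nat.lt_or_ge L 2 with h2 | h2
  · have hL1 : L = 1 := by omega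
    subst hL1
    have h' : n < 10 := by simpa using h
    unfold pvTgt
    norm_num
    split_ifs <;> omega
  · obtain ⟨q, hq0, hpq, hP⟩ := pvPowSplit L h2
    rw [hP] at h
    unfold pvTgt
    rw [hpq, hP]
    have hd := Nat.div_add_mod n 10
    have hdm : n % 10 < 10 := Nat.mod_lt _ (by omega)
    set d := n / 10 with hdd
    set r := n % 10 with hrr
    have hfc := Nat.div_add_mod n (10*q)
    have hfm : n % (10*q) < 10*q := Nat.mod_lt _ (by omega)
    set f := n / (10*q) with hff
    clear_value f
    have hf10 : f < 10 := by
      rw [hff]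
      exact (Nat.div_lt_iff_lt_mul (by omega)).mpr (by omega)
    rw [show (10*q)*f = 10*(f*q) by ring] at hfc
    by_cases hb : f < r
    · rw [if_pos hb]
      have hf8q : f*q ≤ 8*q := Nat.mul_le_mul_right q (by omega)
      have hrw : (d+1)*10 / (10*q) = (d+1)/q := by
        rw [show (d+1)*10 = 10*(d+1) by ring, Nat.mul_div_mul_left _ _ (by omega : (0:Nat) < 10)]
      rw [hrw]
      have hfc' := Nat.div_add_mod (d+1) q
      have hfm' : (d+1) % q < q := Nat.mod_lt _ (by omega)
      set f' := (d+1)/q with hff'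
      clear_value f'
      rw [show q*f' = f'*q by ring] at hfc'
      have h9 : d + 1 ≤ 9*q := by omega
      have hf'9 : f' ≤ 9 := by
        have h10 := Nat.div_le_div_right (c := q) h9
        rwa [show 9*q = q*9 by ring, Nat.mul_div_cancel_left _ hq0, ← hff'] at h10
      refine ⟨by omega, by omega, by omega, ?_⟩
      have hdiv : ((d+1)*10 + f') / (10*q) = f' := by
        apply pvDivEq
        · calc f'*(10*q) = 10*(f'*q) := by ring
            _ ≤ (d+1)*10 + f' := by omega
        · calc (d+1)*10 + f' < (f'*q + q)*10 := by omega
            _ = (f'+1)*(10*q) := by ring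
      rw [hdiv]
      omega
    · rw [if_neg hb]
      have hfq9 : f*q ≤ 9*q := Nat.mul_le_mul_right q (by omega)
      refine ⟨by omega, by omega, by omega, ?_⟩
      have hdiv : (n + (f - r)) / (10*q) = f := by
        apply pvDivEq
        · calc f*(10*q) = 10*(f*q) := by ring
            _ ≤ n := by omega
            _ ≤ n + (f - r) := Nat.le_add_right _ _
        · calc n + (f - r) < 10*(f*q) + 10*q := by omega
            _ = (f+1)*(10*q) := by ring
      rw [hdiv]
      omega

theorem pvTgt_succ (L n : Nat) (hL : 0 < L) (h : n < 10^L) (hnb : n / 10^(L-1) ≠ n % 10) :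
    n + 1 < 10^L ∧ pvTgt L (n+1) = pvTgt L n := by
  rcases Nat.lt_or_ge L 2 with h2 | h2
  · have hL1 : L = 1 := by omega
    subst hL1
    have h' : n < 10 := by simpa using h
    exact absurd (by simp [Nat.mod_eq_of_lt h']) hnb
  · obtain ⟨q, hq0, hpq, hP⟩ := pvPowSplit L h2
    rw [hP] at h ⊢
    rw [hpq] at hnb
    unfold pvTgt
    simp only [hpq]
    have hd := Nat.div_add_mod n 10
    have hdm : n % 10 < 10 := Nat.mod_lt _ (by omega)
    set d := n / 10 with hdd
    set r := n % 10 with hrr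
    have hfc := Nat.div_add_mod n (10*q)
    have hfm : n % (10*q) < 10*q := Nat.mod_lt _ (by omega)
    set f := n / (10*q) with hff
    clear_value f
    have hf10 : f < 10 := by
      rw [hff]
      exact (Nat.div_lt_iff_lt_mul (by omega)).mpr (by omega)
    rw [show (10*q)*f = 10*(f*q) by ring] at hfc
    have hfq9 : f*q ≤ 9*q := Nat.mul_le_mul_right q (by omega)
    have hlt : n + 1 < 10*(10*q) := by
      by_contra hcon
      have hr9 : r = 9 := by omega
      have hf9' : 9 ≤ f := by
        rw [hff]
        rw [Nat.le_div_iff_mul_le (by omega : 0 < 10*q)]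
        omega
      exact hnb (by omega)
    refine ⟨hlt, ?_⟩
    by_cases hr9 : r ≤ 8
    · have hf1 : (n+1) / (10*q) = f := by
        apply pvDivEq
        · calc f*(10*q) = 10*(f*q) := by ring
            _ ≤ n + 1 := by omega
        · calc n + 1 < 10*(f*q) + 10*q := by omega
            _ = (f+1)*(10*q) := by ring
      have hm1 : (n+1) % 10 = r + 1 := by omega
      have hd1 : (n+1) / 10 = d := by omega
      rw [hf1, hm1, hd1]
      by_cases hb : f < r
      · rw [if_pos hb, if_pos (by omega)]
      · rw [if_neg hb, if_neg (by omega)]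
        omega
    · have hr9' : r = 9 := by omega
      have hb : f < r := by omega
      have hm1 : (n+1) % 10 = 0 := by omega
      rw [if_pos hb]
      have hnotlt : ¬ ((n+1) / (10*q) < (n+1) % 10) := by
        rw [hm1]; exact Nat.not_lt_zero _
      rw [if_neg hnotlt, hm1]
      have hn1 : n + 1 = (d+1)*10 := by omega
      rw [hn1]
      simp

theorem pvBookLoop_spec (L : Nat) (rest : List Char) (hL : 0 < L) : ∀ (fuel n : Nat), n < 10^L →
    pvTgt L n - n < fuel →
    pvBookLoop (pvRep L n ++ rest) (L : Int) fuel = pvRep L (pvTgt L n) ++ rest := by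
  intro fuel
  induction fuel with
  | zero => intro n h hm; omega
  | succ fuel ih =>
      intro n h hm
      have hs := pvTgt_spec L n hL h
      rw [pvBookLoop, pvIsBook_rep L n rest hL h]
      by_cases hb : n / 10^(L-1) = n % 10
      · simp [hb, pvTgt_of_boo L n hb]
      · have hd := pvTgt_succ L n hL h hb
        simp only [hb, decide_false, Bool.false_eq_true, if_false]
        have haddarg : pvAddOne (pvRep L n ++ rest) (L : Int) = pvRep L (n+1) ++ rest := by
          have := pvAddOne_spec (pvRep L n) rest (pvRep_dig L n) (by rw [pvRep_length]; omega)
            (by rw [pvNval_rep L n h, pvRep_length]; exact hd.1)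
          rwa [pvRep_length, pvNval_rep L n h] at this
        have hne : pvTgt L n ≠ n := fun he => hb (he ▸ hs.2.2.2)
        rw [haddarg, ih (n+1) hd.1 (by omega), hd.2]

theorem pvLtDiv (a b : Nat) (h : 0 < b) : a < (a / b + 1) * b := by
  have h1 := Nat.div_add_mod' a b
  have h2 : a % b < b := Nat.mod_lt _ h
  calc a = a/b*b + a % b := h1.symm
    _ < (a/b + 1)*b := by rw [Nat.add_one_mul]; omega

theorem pvRstrip9_concat_ne (xs : List Char) (c : Char) (hc : ¬ c = '9') :
    pvRstrip9 (xs ++ [c]) = xs ++ [c] := by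
  unfold pvRstrip9
  simp [hc]

theorem pvRstrip9_concat_nine (xs : List Char) : pvRstrip9 (xs ++ ['9']) = pvRstrip9 xs := by
  unfold pvRstrip9
  simp

theorem pvRstrip9_len (cs : List Char) : (pvRstrip9 cs).length ≤ cs.length := by
  unfold pvRstrip9
  calc (cs.reverse.dropWhile (fun c => c == '9')).reverse.length
      = (cs.reverse.dropWhile (fun c => c == '9')).length := List.length_reverse
    _ ≤ cs.reverse.length := List.length_dropWhile_le _ _
    _ = cs.length := List.length_reverse

theorem pvBump (m d : Nat) (h : d + 1 < 10^m) :
    ∃ bl, (pvRstrip9 (pvRep m d)).getLast? = some bl ∧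
      (pvRstrip9 (pvRep m d)).dropLast ++ [Char.ofNat (bl.toNat + 1)]
        ++ List.replicate (m - (pvRstrip9 (pvRep m d)).length) '0' = pvRep m (d+1) := by
  induction m generalizing d with
  | zero => norm_num at h
  | succ m ih =>
      rw [pvRep]
      by_cases h9 : d % 10 ≤ 8
      · have hm10 : d % 10 < 10 := Nat.mod_lt _ (by omega)
        have hc9 : ¬ Char.ofNat (48 + d % 10) = '9' := by
          intro he
          have h57 := congrArg Char.toNat he
          rw [pvCharVal _ hm10] at h57
          have : ('9' : Char).toNat = 57 := rfl
          omega
        rw [pvRstrip9_concat_ne _ _ hc9]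
        refine ⟨Char.ofNat (48 + d % 10), List.getLast?_concat, ?_⟩
        rw [List.dropLast_concat]
        have hlen : (pvRep m (d/10) ++ [Char.ofNat (48 + d%10)]).length = m + 1 := by
          simp [pvRep_length]
        rw [hlen, Nat.sub_self, List.replicate_zero, List.append_nil]
        rw [show pvRep (m+1) (d+1) = pvRep m ((d+1)/10) ++ [Char.ofNat (48 + (d+1)%10)] from rfl]
        rw [show (d+1)/10 = d/10 by omega, show (d+1)%10 = d%10 + 1 by omega]
        rw [pvCharVal _ hm10, show 48 + d % 10 + 1 = 48 + (d % 10 + 1) by omega]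
      · have h9' : d % 10 = 9 := by omega
        have hch : Char.ofNat (48 + d % 10) = '9' := by rw [h9']
        rw [hch, pvRstrip9_concat_nine]
        have hps : (10:Nat)^(m+1) = 10*10^m := by rw [pow_succ]; ring
        rw [hps] at h
        have hdd : d/10 + 1 < 10^m := by omega
        obtain ⟨bl, hbl, heq⟩ := ih (d/10) hdd
        refine ⟨bl, hbl, ?_⟩
        have hblen : (pvRstrip9 (pvRep m (d/10))).length ≤ m := by
          have := pvRstrip9_len (pvRep m (d/10))
          rwa [pvRep_length] at this
        rw [show m + 1 - (pvRstrip9 (pvRep m (d/10))).length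
            = (m - (pvRstrip9 (pvRep m (d/10))).length) + 1 by omega]
        rw [List.replicate_succ']
        rw [show pvRep (m+1) (d+1) = pvRep m ((d+1)/10) ++ [Char.ofNat (48 + (d+1)%10)] from rfl]
        rw [show (d+1)/10 = d/10 + 1 by omega, show (d+1)%10 = 0 by omega]
        rw [← heq]
        simp [List.append_assoc]

theorem pvB_spec (s : String) (L n : Nat) (rest : List Char) (hL : 0 < L) (h : n < 10^L)
    (hs : s.toList = pvRep L n ++ rest) :
    bookend_numerical_string_alt s (L : Int) = String.ofList (pvRep L (pvTgt L n) ++ rest) := by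
  obtain ⟨M, rfl⟩ : ∃ M, L = M + 1 := ⟨L - 1, by omega⟩
  have hps : (10:Nat)^(M+1) = 10*10^M := by rw [pow_succ]; ring
  have hf10 : n / 10^M < 10 := by
    apply (Nat.div_lt_iff_lt_mul (by positivity)).mpr
    omega
  have hr10 : n % 10 < 10 := Nat.mod_lt _ (by omega)
  unfold bookend_numerical_string_alt
  rw [if_neg (show ¬ ((((M+1 : Nat) : Int)) == 0) = true by
    simp only [beq_iff_eq, Int.natCast_eq_zero]
    omega)]
  have hhead : PySem.List.slice (pvRep (M+1) n ++ rest) none (some ((M+1 : Nat) : Int))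
      = pvRep (M+1) n := by
    rw [PySem.List.slice_to_natCast]
    exact List.take_left' (pvRep_length _ _)
  have htail : PySem.List.slice (pvRep (M+1) n ++ rest) (some ((M+1 : Nat) : Int)) none
      = rest := by
    rw [PySem.List.slice_from_natCast]
    exact List.drop_left' (pvRep_length _ _)
  simp only [hs, hhead, htail]
  have h1 : PySem.List.pyGet? (pvRep (M+1) n ++ rest) 0 = some (Char.ofNat (48 + n / 10^M)) := by
    rw [PySem.List.pyGet?_zero, List.getElem?_append_left (by rw [pvRep_length]; omega),
      pvRep_head (M+1) n (by omega) h]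
    norm_num
  have h2 : PySem.List.pyGet? (pvRep (M+1) n ++ rest) (((M+1 : Nat) : Int) - 1)
      = some (Char.ofNat (48 + n % 10)) := by
    rw [show ((M+1 : Nat) : Int) - 1 = ((M : Nat) : Int) by push_cast; ring,
      PySem.List.pyGet?_natCast, List.getElem?_append_left (by rw [pvRep_length]; omega),
      show pvRep (M+1) n = pvRep M (n/10) ++ [Char.ofNat (48 + n % 10)] from rfl]
    have hgl : (pvRep M (n/10) ++ [Char.ofNat (48 + n % 10)])[(pvRep M (n/10)).length]?
        = some (Char.ofNat (48 + n % 10)) := List.getElem?_concat_length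
    rw [pvRep_length] at hgl
    exact hgl
  simp only [h1, h2]
  have hdrop : PySem.List.slice (pvRep (M+1) n) none (some (-1)) = pvRep M (n/10) := by
    rw [PySem.List.slice_to_neg_one,
      show pvRep (M+1) n = pvRep M (n/10) ++ [Char.ofNat (48 + n % 10)] from rfl,
      List.dropLast_concat]
  have hle := pvCharLe (Char.ofNat (48 + n % 10)) (Char.ofNat (48 + n / 10^M))
  rw [pvCharVal _ hr10, pvCharVal _ hf10] at hle
  by_cases hb : n / 10^M < n % 10
  · -- carry branch
    rw [if_neg (by rw [hle]; omega)]
    simp only [hdrop]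
    have htgt : pvTgt (M+1) n = (n/10+1)*10 + ((n/10+1)*10)/10^M := by
      unfold pvTgt
      rw [show (M+1)-1 = M from rfl, if_pos hb]
    have hd8 : n / 10^M ≤ 8 := by omega
    -- M ≥ 1 in this branch (for M = 0 the condition last > first is impossible)
    have hM : 1 ≤ M := by
      by_contra hc
      have hM0 : M = 0 := by omega
      subst hM0
      simp only [pow_zero, Nat.div_one] at hb
      omega
    obtain ⟨P, hPpos, hPM, _⟩ := pvPowSplit (M+1) (by omega)
    have hPM' : (10:Nat)^M = 10*P := by
      have : (M+1) - 1 = M := rfl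
      rwa [this] at hPM
    -- the dropped-last-digit prefix value d := n/10 satisfies d+1 < 10^M
    have hdP : (n/10) / P = n / 10^M := by
      rw [Nat.div_div_eq_div_mul, ← hPM']
    have hdlt : n/10 < (n/10/P + 1) * P := pvLtDiv _ _ hPpos
    rw [hdP] at hdlt
    have hmul9 : (n / 10^M + 1) * P ≤ 9*P := Nat.mul_le_mul_right P (by omega)
    have hd1 : n/10 + 1 < 10^M := by rw [hPM']; omega
    obtain ⟨bl, hbl, heq⟩ := pvBump M (n/10) hd1
    simp only [PySem.List.pyGet?_neg_one, hbl, pvRep_length, PySem.List.slice_to_neg_one]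
    rw [heq]
    have hPm1 : (10:Nat)^(M-1) = P := by
      have hsp : (10:Nat)^M = 10^(M-1)*10 := by rw [← pow_succ]; congr 1; omega
      rw [hPM'] at hsp
      omega
    obtain ⟨g, hg⟩ : ∃ g, (n/10+1)/P = g := ⟨_, rfl⟩
    have hh := pvRep_head M (n/10 + 1) (by omega) hd1
    rw [hPm1, hg] at hh
    simp only [PySem.List.pyGet?_zero, hh]
    have hf' : ((n/10+1)*10)/10^M = (n/10+1)/P := by
      rw [hPM', show (n/10+1)*10 = 10*(n/10+1) by ring,
        Nat.mul_div_mul_left _ _ (by omega : (0:Nat) < 10)]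
    have hf'9 : (n/10+1)/P ≤ 9 := by
      have h9 := Nat.div_le_div_right (c := P) (show n/10+1 ≤ 9*P by omega)
      rwa [show 9*P = P*9 by ring, Nat.mul_div_cancel_left _ hPpos] at h9
    rw [hg] at hf'9
    rw [htgt,
      show pvRep (M+1) ((n/10+1)*10 + ((n/10+1)*10)/10^M)
        = pvRep M (((n/10+1)*10 + ((n/10+1)*10)/10^M)/10)
          ++ [Char.ofNat (48 + ((n/10+1)*10 + ((n/10+1)*10)/10^M)%10)] from rfl,
      hf', hg,
      show ((n/10+1)*10 + g)/10 = n/10 + 1 by omega,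
      show ((n/10+1)*10 + g)%10 = g by omega]
  · -- no-carry branch
    rw [if_pos (by rw [hle]; omega)]
    rw [hdrop]
    have htgt : pvTgt (M+1) n = n + (n / 10^M - n % 10) := by
      unfold pvTgt
      rw [show (M+1)-1 = M from rfl, if_neg hb]
    rw [htgt]
    rw [show pvRep (M+1) (n + (n / 10^M - n % 10))
        = pvRep M ((n + (n / 10^M - n % 10))/10) ++ [Char.ofNat (48 + (n + (n / 10^M - n % 10))%10)] from rfl]
    have hd := Nat.div_add_mod n 10
    rw [show (n + (n / 10^M - n % 10))/10 = n/10 by omega,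
      show (n + (n / 10^M - n % 10))%10 = n / 10^M by omega]

-- general-character cases of Pre_: the length-window is already bookended, or its last char is a
-- digit not above its first char (itself ≤ '9')

theorem pvHeadElem (u : List Char) (c f : Char) (rest : List Char)
    (hhead : (u ++ [c]).head? = some f) :
    ((u ++ [c]) ++ rest)[0]? = some f := by
  rw [List.getElem?_append_left (by simp), ← List.head?_eq_getElem?]
  exact hhead

theorem pvLastElem (u : List Char) (c : Char) (rest : List Char) :
    ((u ++ [c]) ++ rest)[u.length]? = some c := by
  rw [List.getElem?_append_left (by simp)]
  exact List.getElem?_concat_length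

theorem pvIsBook_window (u : List Char) (c f : Char) (rest : List Char)
    (hhead : (u ++ [c]).head? = some f) :
    pvIsBook ((u ++ [c]) ++ rest) ((u.length + 1 : Nat) : Int) = (f == c) := by
  unfold pvIsBook
  rw [PySem.List.pyGet?_zero, pvHeadElem u c f rest hhead,
    show ((u.length + 1 : Nat) : Int) - 1 = ((u.length : Nat) : Int) by push_cast; ring,
    PySem.List.pyGet?_natCast, pvLastElem u c rest]
  rfl

theorem pvA_incr (fuel : Nat) : ∀ (u : List Char) (c f : Char) (rest : List Char),
    (u ++ [c]).head? = some f → 48 ≤ c.toNat → c.toNat ≤ f.toNat → f.toNat ≤ 57 →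
    f.toNat - c.toNat < fuel →
    pvBookLoop ((u ++ [c]) ++ rest) ((u.length + 1 : Nat) : Int) fuel = (u ++ [f]) ++ rest := by
  induction fuel with
  | zero => intro u c f rest _ _ _ _ hfuel; omega
  | succ fuel ih =>
      intro u c f rest hhead hc hcf hf hfuel
      rw [pvBookLoop, pvIsBook_window u c f rest hhead]
      by_cases hfc : f = c
      · subst hfc
        simp
      · have hfc' : (f == c) = false := by simpa using hfc
        rw [hfc']
        simp only [Bool.false_eq_true, if_false]
        have hcf' : c.toNat < f.toNat := by
          rcases Nat.lt_or_ge c.toNat f.toNat with h | h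
          · exact h
          · exact absurd (pvCharToNatInj c f (by omega)).symm hfc
        -- one add_one step: the last char is a digit below '9', so it is just incremented
        have hstep : pvAddOne ((u ++ [c]) ++ rest) ((u.length + 1 : Nat) : Int)
            = (u ++ [Char.ofNat (c.toNat + 1)]) ++ rest := by
          unfold pvAddOne
          rw [if_neg (show ¬ ((((u.length + 1 : Nat) : Int)) == 0) = true by
            simp only [beq_iff_eq, Int.natCast_eq_zero]
            omega)]
          have hfl : (((u.length + 1 : Nat) : Int)).toNat + 2 = u.length + 3 := by simp
          rw [hfl]
          simp only [pvAddLoop]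
          rw [show (((u.length + 1 : Nat) : Int)) - 1 = ((u.length : Nat) : Int) by push_cast; ring]
          rw [show (u ++ [c]) ++ rest = u ++ (c :: rest) by simp]
          simp only [PySem.List.pyGet?_append_length]
          rw [if_neg (show ¬ ((((u.length + 1 : Nat) : Int)) < 1) by push_cast; omega)]
          rw [if_pos (show '0' ≤ c ∧ c ≤ '8' by
            rw [pvCharLe, pvCharLe]
            have h0' : ('0' : Char).toNat = 48 := rfl
            have h8' : ('8' : Char).toNat = 56 := rfl
            omega)]
          rw [PySem.List.slice_to_natCast, List.take_left]
          rw [show ((u.length : Nat) : Int) + 1 = ((u.length + 1 : Nat) : Int) by push_cast; ring]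
          rw [PySem.List.slice_from_natCast]
          rw [show u ++ (c :: rest) = (u ++ [c]) ++ rest by simp,
            List.drop_left' (by simp)]
        rw [hstep]
        have hct : (Char.ofNat (c.toNat + 1)).toNat = c.toNat + 1 := by
          rw [show c.toNat + 1 = 48 + (c.toNat - 48 + 1) by omega]
          rw [pvCharVal _ (by omega)]
        have hhead' : (u ++ [Char.ofNat (c.toNat + 1)]).head? = some f := by
          rcases u with _ | ⟨u0, us⟩
          · exfalso
            simp at hhead
            subst hhead
            omega
          · simpa using (by simpa using hhead : u0 = f)
        have := ih u (Char.ofNat (c.toNat + 1)) f rest hhead' (by omega) (by omega) hf (by omega)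
        simpa using this

theorem pvA_book (u : List Char) (c : Char) (rest : List Char) (fuel : Nat)
    (hhead : (u ++ [c]).head? = some c) :
    pvBookLoop ((u ++ [c]) ++ rest) ((u.length + 1 : Nat) : Int) (fuel + 1) = (u ++ [c]) ++ rest := by
  rw [pvBookLoop, pvIsBook_window u c c rest hhead]
  simp

theorem pvB_easy (s : String) (u : List Char) (c f : Char) (rest : List Char)
    (hs : s.toList = (u ++ [c]) ++ rest)
    (hhead : (u ++ [c]).head? = some f) (hle : c.toNat ≤ f.toNat) :
    bookend_numerical_string_alt s ((u.length + 1 : Nat) : Int) = String.ofList ((u ++ [f]) ++ rest) := by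
  unfold bookend_numerical_string_alt
  rw [if_neg (show ¬ ((((u.length + 1 : Nat) : Int)) == 0) = true by
    simp only [beq_iff_eq, Int.natCast_eq_zero]
    omega)]
  have hhd : PySem.List.slice ((u ++ [c]) ++ rest) none (some ((u.length + 1 : Nat) : Int))
      = u ++ [c] := by
    rw [PySem.List.slice_to_natCast]
    exact List.take_left' (by simp)
  have htl : PySem.List.slice ((u ++ [c]) ++ rest) (some ((u.length + 1 : Nat) : Int)) none
      = rest := by
    rw [PySem.List.slice_from_natCast]
    exact List.drop_left' (by simp)
  simp only [hs, hhd, htl]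
  have h1 : PySem.List.pyGet? ((u ++ [c]) ++ rest) 0 = some f := by
    rw [PySem.List.pyGet?_zero]
    exact pvHeadElem u c f rest hhead
  have h2 : PySem.List.pyGet? ((u ++ [c]) ++ rest) (((u.length + 1 : Nat) : Int) - 1) = some c := by
    rw [show ((u.length + 1 : Nat) : Int) - 1 = ((u.length : Nat) : Int) by push_cast; ring,
      PySem.List.pyGet?_natCast]
    exact pvLastElem u c rest
  simp only [h1, h2]
  rw [if_pos (by rw [pvCharLe]; exact hle)]
  rw [PySem.List.slice_to_neg_one, List.dropLast_concat]

-- ===== VERDICT (by name: the statement is the Claim_ definition above) =====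
theorem bookend_numerical_string_spec : Claim_equal_bookend_numerical_string := by
  intro s L _ hpre
  unfold Spec_bookend_numerical_string
  rcases hpre with hL0 | ⟨hL1, hLlen, hcond⟩
  · subst hL0
    unfold bookend_numerical_string bookend_numerical_string_alt
    simp
  · set W := s.toList.take L.toNat with hW
    set R := s.toList.drop L.toNat with hR
    have hsplit : s.toList = W ++ R := (List.take_append_drop _ _).symm
    have hWlen : W.length = L.toNat := by
      rw [hW, List.length_take]
      omega
    have hWcast : ((W.length : Nat) : Int) = L := by rw [hWlen]; omega
    have hWne : W ≠ [] := by
      intro hnil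
      rw [hnil] at hWlen
      simp at hWlen
      omega
    rcases List.eq_nil_or_concat W with hnil | ⟨u, c, hWuc⟩
    · exact absurd hnil hWne
    rw [List.concat_eq_append] at hWuc
    obtain ⟨f, hf⟩ : ∃ f, (u ++ [c]).head? = some f := by cases u <;> simp
    have hlast : W.getLast? = some c := by rw [hWuc]; exact List.getLast?_concat
    have hulen : ((u.length + 1 : Nat) : Int) = L := by
      rw [← hWcast, hWuc]
      simp
    have hA0 : bookend_numerical_string s L = String.ofList (pvBookLoop s.toList L 100) := by
      unfold bookend_numerical_string
      rw [if_neg (show ¬ ((L == 0) = true) by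
        simp only [beq_iff_eq]
        omega)]
    rcases hcond with hbook | hwin | hdig
    · -- window already bookended: both sides return the string unchanged
      have hfc : f = c := by
        rw [hWuc] at hbook
        rw [hbook, List.getLast?_concat] at hf
        exact (Option.some_inj.mp hf).symm
      rw [hfc] at hf
      rw [hA0, hsplit, hWuc, ← hulen, pvA_book u c R 99 hf,
        pvB_easy s u c c R (by rw [hsplit, hWuc]) hf (le_refl _)]
    · -- last char a digit not above the first char (≤ '9'): both raise the last char to the first
      have hfW : W.head? = some f := by rw [hWuc]; exact hf
      rw [hfW, hlast] at hwin
      simp only [Option.getD_some] at hwin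
      rw [hA0, hsplit, hWuc, ← hulen,
        pvA_incr 100 u c f R hf (by omega) (by omega) (by omega) (by omega),
        pvB_easy s u c f R (by rw [hsplit, hWuc]) hf (by omega)]
    · -- all-digit window: the closed form on the numeric value
      have hdig' : pvDig W := by
        intro x hx
        have := List.all_eq_true.mp hdig x hx
        simpa using this
      have hpos : 0 < W.length := by
        rw [hWuc]; simp
      have hn := pvNval_lt W hdig'
      have hrepr := pvRep_nval W hdig'
      have hts := pvTgt_spec W.length (pvNval W) hpos hn
      have hloop := pvBookLoop_spec W.length R hpos 100 (pvNval W) hn (by omega)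
      rw [hrepr] at hloop
      rw [hA0, hsplit, ← hWcast, hloop,
        pvB_spec s W.length (pvNval W) R hpos hn (by rw [hsplit, hrepr])]
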